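-- pv_equiv track=rewrite | github.com/lifunudt/blender_based_render | src/utility/Utility.py | generate_equidistant_values
-- ===== SOURCE A (Python) =====
-- def generate_equidistant_values(num, space_size_per_dimension):
--     """ This function generates N equidistant values in a 3-dim space and returns num of them.
--
--     Every dimension of the space is limited by [0, K], where K is the given space_size_per_dimension.
--     Basically it splits a cube of shape K x K x K in to N smaller blocks. Where, N = cube_length^3
--     and cube_length is the smallest integer for which N >= num.
--
--     If K is not a multiple of N, then the sum of all blocks might
--     not fill up the whole K ** 3 cube.
--
--     :param num: The total number of values required.
--     :param space_size_per_dimension: The side length of cube.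
--     """
--     num_splits_per_dimension = 1
--     values = []
--     # find cube_length bound of cubes to be made
--     while num_splits_per_dimension ** 3 < num:
--         num_splits_per_dimension += 1
--
--     # Calc the side length of a block. We do a integer division here, s.t. we get blocks with the exact same size, even though we are then not using the full space of [0, 255] ** 3
--     block_length = space_size_per_dimension // num_splits_per_dimension
--
--     # Calculate the center of each block and use them as equidistant values
--     r_mid_point = block_length // 2
--     for r in range(num_splits_per_dimension):
--         g_mid_point = block_length // 2
--         for g in range(num_splits_per_dimension):
--             b_mid_point = block_length // 2
--             for b in range(num_splits_per_dimension):
--                 values.append([r_mid_point, g_mid_point, b_mid_point])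
--                 b_mid_point += block_length
--             g_mid_point += block_length
--         r_mid_point += block_length
--
--     return values[:num], num_splits_per_dimension
-- ===== SOURCE B (Python) =====
-- def generate_equidistant_values(num, space_size_per_dimension):
--     num_splits_per_dimension = 1
--     while num_splits_per_dimension ** 3 < num:
--         num_splits_per_dimension += 1
--     n = num_splits_per_dimension
--     block_length = space_size_per_dimension // n
--     # closed-form centre of block k along one axis
--     c = [block_length // 2 + k * block_length for k in range(n)]
--     # single flat pass: unravel index i into (r, g, b)
--     values = [[c[i // (n * n)], c[(i // n) % n], c[i % n]] for i in range(n ** 3)]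
--     return values[:num], n
-- ===== Notes on version B (the rewrite author's own statement) =====
-- stated objective: alternative
-- what changed: Replaces the three nested accumulator loops (each carrying a running mid-point that is incremented per iteration) by a precomputed closed-form list of per-axis centres and a single flat pass whose index is unravelled into (r,g,b) coordinates by div/mod.
import Mathlib
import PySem

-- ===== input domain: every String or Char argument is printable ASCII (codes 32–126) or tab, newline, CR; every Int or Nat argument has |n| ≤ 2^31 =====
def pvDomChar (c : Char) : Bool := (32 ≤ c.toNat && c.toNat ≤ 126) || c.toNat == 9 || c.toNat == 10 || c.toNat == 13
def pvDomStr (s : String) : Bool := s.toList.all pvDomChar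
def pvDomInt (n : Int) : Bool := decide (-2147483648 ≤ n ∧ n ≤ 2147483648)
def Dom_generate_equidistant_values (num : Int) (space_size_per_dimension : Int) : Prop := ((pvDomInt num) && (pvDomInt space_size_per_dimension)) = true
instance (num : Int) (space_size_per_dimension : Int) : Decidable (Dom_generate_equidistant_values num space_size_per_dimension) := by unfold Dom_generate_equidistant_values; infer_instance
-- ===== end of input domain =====

-- B replaces A's three nested mid-point accumulator loops by a precomputed list of per-axis
-- centres and one flat pass unravelling the cell index with div/mod (objective: alternative).

-- the 'while num_splits_per_dimension ** 3 < num' search, shared verbatim by A and B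
-- (B's Python keeps this loop unchanged)
def pvFindN (num : Int) (c : Int) (hc : 1 ≤ c) : Int :=
  if h : c ^ 3 < num then pvFindN num (c + 1) (by omega) else c
termination_by (num - c).toNat
decreasing_by
  have h3 : c ≤ c ^ 3 := by
    nlinarith [mul_nonneg (mul_nonneg (show (0:Int) ≤ c by omega)
      (show (0:Int) ≤ c - 1 by omega)) (show (0:Int) ≤ c + 1 by omega)]
  omega

-- ===== PORT A =====
def generate_equidistant_values (num : Int) (space_size_per_dimension : Int) : List (List Int) × Int :=
  let n := pvFindN num 1 (by norm_num)
  let block_length := PySem.Int.floordiv space_size_per_dimension n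
  let st :=
    (PySem.List.pyRange 0 n 1).foldl (fun (s : List (List Int) × Int) _r =>
      let st2 :=
        (PySem.List.pyRange 0 n 1).foldl (fun (t : List (List Int) × Int) _g =>
          let st3 :=
            (PySem.List.pyRange 0 n 1).foldl (fun (u : List (List Int) × Int) _b =>
              (u.1 ++ [[s.2, t.2, u.2]], u.2 + block_length))
              (t.1, PySem.Int.floordiv block_length 2)
          (st3.1, t.2 + block_length))
          (s.1, PySem.Int.floordiv block_length 2)
      (st2.1, s.2 + block_length))
      ([], PySem.Int.floordiv block_length 2)
  (PySem.List.slice st.1 none (some num), n)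

-- ===== PORT B =====
def generate_equidistant_values_alt (num : Int) (space_size_per_dimension : Int) : List (List Int) × Int :=
  let n := pvFindN num 1 (by norm_num)
  let block_length := PySem.Int.floordiv space_size_per_dimension n
  let c := (PySem.List.pyRange 0 n 1).map
    (fun k => PySem.Int.floordiv block_length 2 + k * block_length)
  -- c[·] indices are always in range; pyGetD is Python indexing there (default never read)
  let values := (PySem.List.pyRange 0 (n ^ 3) 1).map (fun i =>
    [PySem.List.pyGetD c (PySem.Int.floordiv i (n * n)) 0,
     PySem.List.pyGetD c (PySem.Int.mod (PySem.Int.floordiv i n) n) 0,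
     PySem.List.pyGetD c (PySem.Int.mod i n) 0])
  (PySem.List.slice values none (some num), n)

-- ===== PRECONDITION & SPEC =====
def Spec_generate_equidistant_values (num : Int) (space_size_per_dimension : Int) (out : List (List Int) × Int) : Prop := out = generate_equidistant_values_alt num space_size_per_dimension
instance (num : Int) (space_size_per_dimension : Int) (out : List (List Int) × Int) : Decidable (Spec_generate_equidistant_values num space_size_per_dimension out) := by unfold Spec_generate_equidistant_values; infer_instance

-- ===== CLAIM (what is proved, stated in full; the proofs are below) =====
def Claim_equal_generate_equidistant_values : Prop := ∀ (num : Int) (space_size_per_dimension : Int), Dom_generate_equidistant_values num space_size_per_dimension → Spec_generate_equidistant_values num space_size_per_dimension (generate_equidistant_values num space_size_per_dimension)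

-- ===== LEMMAS AND PROOFS =====

theorem pvFindN_pos (num c : Int) (hc : 1 ≤ c) : 1 ≤ pvFindN num c hc := by
  refine pvFindN.induct num (motive := fun c hc => 1 ≤ pvFindN num c hc) ?_ ?_ c hc
  · intro c hc h ih; rw [pvFindN, dif_pos h]; exact ih
  · intro c hc h; rw [pvFindN, dif_neg h]; exact hc

-- inner loop of A: append one [x, y, mid] per step, mid advancing by bl
theorem pvInner (bl x y : Int) (N : Nat) (init : List (List Int)) (start : Int) :
    (List.range N).foldl
      (fun (u : List (List Int) × Int) _ => (u.1 ++ [[x, y, u.2]], u.2 + bl)) (init, start)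
    = (init ++ (List.range N).map (fun (b : Nat) => [x, y, start + (b : Int) * bl]),
       start + (N : Int) * bl) := by
  induction N with
  | zero => simp
  | succ N ih =>
    rw [List.range_succ, List.foldl_append, ih]
    rw [List.map_append]
    simp only [List.foldl_cons, List.foldl_nil, List.map_cons, List.map_nil,
      List.append_assoc, Prod.mk.injEq]
    constructor
    · trivial
    · push_cast; ring

-- middle loop of A
theorem pvMid (bl x : Int) (M N : Nat) (init : List (List Int)) (start : Int) :
    (List.range N).foldl
      (fun (t : List (List Int) × Int) _ =>
        ((( (List.range M).foldl
            (fun (u : List (List Int) × Int) _ => (u.1 ++ [[x, t.2, u.2]], u.2 + bl))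
            (t.1, PySem.Int.floordiv bl 2)).1), t.2 + bl)) (init, start)
    = (init ++ (List.range N).flatMap (fun (g : Nat) =>
        (List.range M).map (fun (b : Nat) =>
          [x, start + (g : Int) * bl, PySem.Int.floordiv bl 2 + (b : Int) * bl])),
       start + (N : Int) * bl) := by
  induction N with
  | zero => simp
  | succ N ih =>
    rw [List.range_succ, List.foldl_append, ih]
    rw [List.flatMap_append]
    simp only [List.foldl_cons, List.foldl_nil, pvInner, List.flatMap_cons,
      List.flatMap_nil, List.append_assoc, List.append_nil, Prod.mk.injEq]
    constructor
    · trivial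
    · push_cast; ring

-- outer loop of A
theorem pvOuter (bl : Int) (M N : Nat) (init : List (List Int)) (start : Int) :
    (List.range N).foldl
      (fun (s : List (List Int) × Int) _ =>
        ((( (List.range M).foldl
            (fun (t : List (List Int) × Int) _ =>
              ((( (List.range M).foldl
                  (fun (u : List (List Int) × Int) _ =>
                    (u.1 ++ [[s.2, t.2, u.2]], u.2 + bl))
                  (t.1, PySem.Int.floordiv bl 2)).1), t.2 + bl))
            (s.1, PySem.Int.floordiv bl 2)).1), s.2 + bl)) (init, start)
    = (init ++ (List.range N).flatMap (fun (r : Nat) =>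
        (List.range M).flatMap (fun (g : Nat) =>
          (List.range M).map (fun (b : Nat) =>
            [start + (r : Int) * bl, PySem.Int.floordiv bl 2 + (g : Int) * bl,
             PySem.Int.floordiv bl 2 + (b : Int) * bl]))),
       start + (N : Int) * bl) := by
  induction N with
  | zero => simp
  | succ N ih =>
    rw [List.range_succ, List.foldl_append, ih]
    rw [List.flatMap_append]
    simp only [List.foldl_cons, List.foldl_nil, pvMid, List.flatMap_cons,
      List.flatMap_nil, List.append_assoc, List.append_nil, Prod.mk.injEq]
    constructor
    · trivial
    · push_cast; ring

-- flat index over range (a*b) unravels into two nested ranges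
theorem pvRangeMul {α : Type} (a b : Nat) (f : Nat → α) :
    (List.range (a * b)).map f
    = (List.range a).flatMap (fun i => (List.range b).map (fun j => f (i * b + j))) := by
  induction a with
  | zero => simp
  | succ a ih =>
    have : (a + 1) * b = a * b + b := by ring
    rw [this, List.range_add, List.map_append, ih, List.range_succ, List.flatMap_append]
    simp [List.map_map, Function.comp, Nat.mul_comm a b, Nat.add_comm]

-- the two values lists coincide, for any block length and any split count N
theorem pvValuesEq (N : Nat) (bl : Int) :
    ((PySem.List.pyRange 0 (N : Int) 1).foldl
      (fun (s : List (List Int) × Int) _r =>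
        let st2 := (PySem.List.pyRange 0 (N : Int) 1).foldl
          (fun (t : List (List Int) × Int) _g =>
            let st3 := (PySem.List.pyRange 0 (N : Int) 1).foldl
              (fun (u : List (List Int) × Int) _b =>
                (u.1 ++ [[s.2, t.2, u.2]], u.2 + bl)) (t.1, PySem.Int.floordiv bl 2)
            (st3.1, t.2 + bl)) (s.1, PySem.Int.floordiv bl 2)
        (st2.1, s.2 + bl)) ([], PySem.Int.floordiv bl 2)).1
    = (PySem.List.pyRange 0 ((N : Int) ^ 3) 1).map (fun i =>
        [PySem.List.pyGetD ((PySem.List.pyRange 0 (N : Int) 1).map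
            (fun k => PySem.Int.floordiv bl 2 + k * bl))
            (PySem.Int.floordiv i ((N : Int) * (N : Int))) 0,
         PySem.List.pyGetD ((PySem.List.pyRange 0 (N : Int) 1).map
            (fun k => PySem.Int.floordiv bl 2 + k * bl))
            (PySem.Int.mod (PySem.Int.floordiv i (N : Int)) (N : Int)) 0,
         PySem.List.pyGetD ((PySem.List.pyRange 0 (N : Int) 1).map
            (fun k => PySem.Int.floordiv bl 2 + k * bl))
            (PySem.Int.mod i (N : Int)) 0]) := by
  have hc3 : ((N : Int) ^ 3) = ((N ^ 3 : Nat) : Int) := by push_cast; ring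
  rw [hc3]
  simp only [PySem.List.pyRange_zero_natCast, List.foldl_map, List.map_map]
  rw [pvOuter]
  simp only [List.nil_append]
  rw [show N ^ 3 = N * (N * N) from by ring, pvRangeMul]
  apply List.flatMap_congr; intro r hr
  rw [pvRangeMul]
  apply List.flatMap_congr; intro g hg
  apply List.map_congr_left; intro b hb
  simp only [Function.comp_apply, List.mem_range] at *
  have hN0 : 0 < N := by omega
  have hNN : 0 < N * N := Nat.mul_pos hN0 hN0
  have hlt : g * N + b < N * N := by nlinarith
  have hdiv1 : (r * (N * N) + (g * N + b)) / (N * N) = r := by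
    rw [show r * (N * N) + (g * N + b) = (g * N + b) + (N * N) * r from by ring,
      Nat.add_mul_div_left _ _ hNN, Nat.div_eq_of_lt hlt]
    omega
  have hdiv2 : (r * (N * N) + (g * N + b)) / N % N = g := by
    rw [show r * (N * N) + (g * N + b) = b + N * (r * N + g) from by ring,
      Nat.add_mul_div_left _ _ hN0, Nat.div_eq_of_lt hb,
      show 0 + (r * N + g) = g + N * r from by ring,
      Nat.add_mul_mod_self_left, Nat.mod_eq_of_lt hg]
  have hdiv3 : (r * (N * N) + (g * N + b)) % N = b := by
    rw [show r * (N * N) + (g * N + b) = b + N * (r * N + g) from by ring,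
      Nat.add_mul_mod_self_left, Nat.mod_eq_of_lt hb]
  rw [← Nat.cast_mul, PySem.Int.floordiv_natCast, PySem.Int.floordiv_natCast,
    PySem.Int.mod_natCast, PySem.Int.mod_natCast, hdiv1, hdiv2, hdiv3,
    PySem.List.pyGetD_natCast, PySem.List.pyGetD_natCast, PySem.List.pyGetD_natCast,
    PySem.List.getD_map_range _ _ _ _ hr, PySem.List.getD_map_range _ _ _ _ hg,
    PySem.List.getD_map_range _ _ _ _ hb]
  simp

-- ===== VERDICT (by name: the statement is the Claim_ definition above) =====
theorem generate_equidistant_values_spec : Claim_equal_generate_equidistant_values := by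
  intro num ssd _
  unfold Spec_generate_equidistant_values generate_equidistant_values generate_equidistant_values_alt
  have h1 : 1 ≤ pvFindN num 1 (by norm_num) := pvFindN_pos num 1 (by norm_num)
  obtain ⟨N, hN⟩ : ∃ N : Nat, pvFindN num 1 (by norm_num) = (N : Int) :=
    ⟨(pvFindN num 1 (by norm_num)).toNat, (Int.toNat_of_nonneg (by omega)).symm⟩
  simp only [hN]
  rw [pvValuesEq]
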